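-- pv_equiv track=rewrite | github.com/VectorDimensions/CustomerSupportAgenticAI | server/graders.py | _correct_order_of_operations
-- ===== SOURCE A (Python) =====
-- def _correct_order_of_operations(action_history: list[dict]) -> bool:
--     """Return True if at least one lookup happened before the first resolution action."""
--     resolution_commands = {"issue_refund", "send_replacement"}
--     lookup_commands = {"lookup_order", "lookup_customer", "check_policy", "check_inventory"}
--
--     first_resolution_idx = None
--     last_lookup_before_resolution_idx = None
--
--     for i, action in enumerate(action_history):
--         cmd = action.get("command", "")
--         if cmd in lookup_commands:
--             last_lookup_before_resolution_idx = i
--         elif cmd in resolution_commands and first_resolution_idx is None: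
--             first_resolution_idx = i
--
--     if first_resolution_idx is None or last_lookup_before_resolution_idx is None:
--         return False
--     return last_lookup_before_resolution_idx < first_resolution_idx
-- ===== SOURCE B (Python) =====
-- def _correct_order_of_operations(action_history: list[dict]) -> bool:
--     """Return True if at least one lookup happened before the first resolution action."""
--     lookup_commands = {"lookup_order", "lookup_customer", "check_policy", "check_inventory"}
--     resolution_commands = {"issue_refund", "send_replacement"}
--
--     lookups = [i for i, a in enumerate(action_history)
--                if a.get("command", "") in lookup_commands]
--     resolutions = [i for i, a in enumerate(action_history)
--                    if a.get("command", "") in resolution_commands]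
--     if not lookups or not resolutions:
--         return False
--     return max(lookups) < min(resolutions)
-- ===== Notes on version B (the rewrite author's own statement) =====
-- stated objective: simpler
-- what changed: Replaces the single-pass loop with two running Option accumulators by two index comprehensions plus max/min aggregates: the result is max(lookup indices) < min(resolution indices), with False when either list is empty.
import Mathlib
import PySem

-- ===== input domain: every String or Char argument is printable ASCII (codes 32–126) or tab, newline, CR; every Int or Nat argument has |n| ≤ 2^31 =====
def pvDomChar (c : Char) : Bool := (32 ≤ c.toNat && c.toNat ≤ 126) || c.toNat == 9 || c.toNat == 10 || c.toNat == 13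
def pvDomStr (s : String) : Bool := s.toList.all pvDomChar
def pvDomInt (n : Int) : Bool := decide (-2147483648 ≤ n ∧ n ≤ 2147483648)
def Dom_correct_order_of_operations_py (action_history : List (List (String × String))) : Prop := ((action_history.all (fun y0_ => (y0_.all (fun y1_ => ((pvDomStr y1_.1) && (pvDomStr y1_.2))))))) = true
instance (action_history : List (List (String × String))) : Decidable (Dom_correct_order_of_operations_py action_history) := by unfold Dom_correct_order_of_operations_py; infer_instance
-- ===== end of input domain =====

-- B replaces A's single-pass loop with two running Option accumulators by two index
-- comprehensions plus max/min aggregates (objective: simpler).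

-- shared helper: action.get("command", "") on the dict (association list) argument
def pvCmd (a : List (String × String)) : String :=
  (PySem.Dict.ofList a).getD "command" ""

def pvIsLookup (cmd : String) : Bool :=
  ["lookup_order", "lookup_customer", "check_policy", "check_inventory"].contains cmd

def pvIsRes (cmd : String) : Bool :=
  ["issue_refund", "send_replacement"].contains cmd

-- ===== PORT A =====
def correct_order_of_operations_py (action_history : List (List (String × String))) : Bool :=
  let final :=
    (PySem.List.enumerate action_history 0).foldl
      (fun (st : Option Int × Option Int) p =>
        let cmd := pvCmd p.2
        if pvIsLookup cmd then (st.1, some p.1)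
        else if pvIsRes cmd && st.1.isNone then (some p.1, st.2)
        else st)
      (none, none)
  match final with
  | (some fr, some ll) => decide (ll < fr)
  | _ => false

-- ===== PORT B =====
def correct_order_of_operations_py_alt (action_history : List (List (String × String))) : Bool :=
  let lookups := ((PySem.List.enumerate action_history 0).filter
      (fun p => pvIsLookup (pvCmd p.2))).map (·.1)
  let resolutions := ((PySem.List.enumerate action_history 0).filter
      (fun p => pvIsRes (pvCmd p.2))).map (·.1)
  -- 'if not lookups or not resolutions: return False' as the empty cases;
  -- max(lookups) / min(resolutions) as the running max/min fold over the nonempty list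
  -- (exactly Python's keyless max/min; cf. PySem.List.max?_id_cons / min?_id_cons)
  match lookups, resolutions with
  | [], _ => false
  | _, [] => false
  | l0 :: lt, r0 :: rt => decide (lt.foldl max l0 < rt.foldl min r0)

-- ===== PRECONDITION & SPEC =====
def Spec_correct_order_of_operations_py (action_history : List (List (String × String))) (out : Bool) : Prop := out = correct_order_of_operations_py_alt action_history
instance (action_history : List (List (String × String))) (out : Bool) : Decidable (Spec_correct_order_of_operations_py action_history out) := by unfold Spec_correct_order_of_operations_py; infer_instance

-- ===== CLAIM (what is proved, stated in full; the proofs are below) =====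
def Claim_equal_correct_order_of_operations_py : Prop := ∀ (action_history : List (List (String × String))), Dom_correct_order_of_operations_py action_history → Spec_correct_order_of_operations_py action_history (correct_order_of_operations_py action_history)

-- ===== LEMMAS AND PROOFS =====

-- A's loop step
def pvStep (st : Option Int × Option Int) (p : Int × List (String × String)) :
    Option Int × Option Int :=
  let cmd := pvCmd p.2
  if pvIsLookup cmd then (st.1, some p.1)
  else if pvIsRes cmd && st.1.isNone then (some p.1, st.2)
  else st

-- B's two index lists, parametrised by the enumeration start index
def pvLooks (s : Int) (xs : List (List (String × String))) : List Int :=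
  ((PySem.List.enumerate xs s).filter (fun p => pvIsLookup (pvCmd p.2))).map (·.1)

def pvResos (s : Int) (xs : List (List (String × String))) : List Int :=
  ((PySem.List.enumerate xs s).filter (fun p => pvIsRes (pvCmd p.2))).map (·.1)

theorem pvLooks_cons (x : List (String × String)) (xs : List (List (String × String))) (s : Int) :
    pvLooks s (x :: xs) =
      if pvIsLookup (pvCmd x) then s :: pvLooks (s + 1) xs else pvLooks (s + 1) xs := by
  simp only [pvLooks, PySem.List.enumerate_cons, List.filter_cons]
  split <;> simp

theorem pvResos_cons (x : List (String × String)) (xs : List (List (String × String))) (s : Int) :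
    pvResos s (x :: xs) =
      if pvIsRes (pvCmd x) then s :: pvResos (s + 1) xs else pvResos (s + 1) xs := by
  simp only [pvResos, PySem.List.enumerate_cons, List.filter_cons]
  split <;> simp

theorem pv_not_both (c : String) (h : pvIsLookup c = true) : pvIsRes c = false := by
  simp only [pvIsLookup, List.contains_eq_mem, List.mem_cons,
    List.not_mem_nil, or_false, decide_eq_true_eq] at h
  rcases h with rfl | rfl | rfl | rfl <;> decide

theorem getLast?_cons {α : Type} (a : α) (l : List α) :
    (a :: l).getLast? = some (l.getLast?.getD a) := by
  induction l generalizing a with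
  | nil => rfl
  | cons b t ih => rw [List.getLast?_cons_cons, ih b]; cases t.getLast? <;> simp

-- the loop invariant: A's fold computes B's aggregates
theorem pv_fold_eq (xs : List (List (String × String))) :
    ∀ (s : Int) (fr ll : Option Int),
      (PySem.List.enumerate xs s).foldl pvStep (fr, ll) =
        (fr.or (pvResos s xs).head?, ((pvLooks s xs).getLast?).or ll) := by
  induction xs with
  | nil => intro s fr ll; simp [pvLooks, pvResos]
  | cons x xs ih =>
    intro s fr ll
    rw [PySem.List.enumerate_cons, List.foldl_cons, pvLooks_cons, pvResos_cons]
    by_cases hl : pvIsLookup (pvCmd x) = true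
    · have hr := pv_not_both _ hl
      simp only [pvStep, if_pos, hl, hr]
      rw [ih (s + 1) fr (some s)]
      simp [getLast?_cons]
    · by_cases hr : pvIsRes (pvCmd x) = true
      · simp only [pvStep, hl, hr, if_false, Bool.false_eq_true, Bool.true_and]
        cases fr with
        | none =>
          simp only [Option.isNone_none, if_true]
          rw [ih (s + 1) (some s) ll]
          simp
        | some v =>
          simp only [Option.isNone_some, if_false, Bool.false_eq_true]
          rw [ih (s + 1) (some v) ll]
          simp
      · simp only [pvStep, hl, hr, Bool.false_eq_true, if_false, Bool.false_and]
        rw [ih (s + 1) fr ll]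

-- all members of pvLooks/pvResos s xs are ≥ s
theorem pv_foldl_max_looks (xs : List (List (String × String))) :
    ∀ (s a : Int), a < s → (pvLooks s xs).foldl max a = (pvLooks s xs).getLast?.getD a := by
  induction xs with
  | nil => intro s a _; simp [pvLooks]
  | cons x xs ih =>
    intro s a ha
    rw [pvLooks_cons]
    by_cases hl : pvIsLookup (pvCmd x) = true
    · simp only [hl, if_true, List.foldl_cons, getLast?_cons]
      have : max a s = s := by omega
      rw [this, ih (s + 1) s (by omega)]
      simp
    · simp only [hl, Bool.false_eq_true, if_false]
      exact ih (s + 1) a (by omega)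

theorem pv_foldl_min_resos (xs : List (List (String × String))) :
    ∀ (s a : Int), a < s → (pvResos s xs).foldl min a = a := by
  induction xs with
  | nil => intro s a _; simp [pvResos]
  | cons x xs ih =>
    intro s a ha
    rw [pvResos_cons]
    by_cases hr : pvIsRes (pvCmd x) = true
    · simp only [hr, if_true, List.foldl_cons]
      have : min a s = a := by omega
      rw [this]
      exact ih (s + 1) a (by omega)
    · simp only [hr, Bool.false_eq_true, if_false]
      exact ih (s + 1) a (by omega)

theorem pv_max?_looks (xs : List (List (String × String))) :
    ∀ (s : Int), PySem.List.max? (pvLooks s xs) (fun x => x) = (pvLooks s xs).getLast? := by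
  induction xs with
  | nil => intro s; simp [pvLooks, PySem.List.max?]
  | cons x xs ih =>
    intro s
    rw [pvLooks_cons]
    by_cases hl : pvIsLookup (pvCmd x) = true
    · simp only [hl, if_true]
      rw [PySem.List.max?_id_cons, getLast?_cons,
        pv_foldl_max_looks xs (s + 1) s (by omega)]
    · simp only [hl, Bool.false_eq_true, if_false]; exact ih (s + 1)

theorem pv_min?_resos (xs : List (List (String × String))) :
    ∀ (s : Int), PySem.List.min? (pvResos s xs) (fun x => x) = (pvResos s xs).head? := by
  induction xs with
  | nil => intro s; simp [pvResos, PySem.List.min?]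
  | cons x xs ih =>
    intro s
    rw [pvResos_cons]
    by_cases hr : pvIsRes (pvCmd x) = true
    · simp only [hr, if_true]
      rw [PySem.List.min?_id_cons, pv_foldl_min_resos xs (s + 1) s (by omega)]
      simp
    · simp only [hr, Bool.false_eq_true, if_false]; exact ih (s + 1)

-- ===== VERDICT (by name: the statement is the Claim_ definition above) =====
theorem correct_order_of_operations_py_spec : Claim_equal_correct_order_of_operations_py := by
  intro ah _
  unfold Spec_correct_order_of_operations_py correct_order_of_operations_py
    correct_order_of_operations_py_alt
  have hstep : (fun (st : Option Int × Option Int) (p : Int × List (String × String)) =>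
      let cmd := pvCmd p.2
      if pvIsLookup cmd then (st.1, some p.1)
      else if pvIsRes cmd && st.1.isNone then (some p.1, st.2)
      else st) = pvStep := rfl
  rw [hstep, pv_fold_eq ah 0 none none]
  show (match ((Option.none.or (pvResos 0 ah).head?, ((pvLooks 0 ah).getLast?).or none) :
          Option Int × Option Int) with
      | (some fr, some ll) => decide (ll < fr)
      | _ => false) =
    (match pvLooks 0 ah, pvResos 0 ah with
     | [], _ => false
     | _, [] => false
     | l0 :: lt, r0 :: rt => decide (lt.foldl max l0 < rt.foldl min r0))
  have hM := pv_max?_looks ah 0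
  have hm := pv_min?_resos ah 0
  cases hL : pvLooks 0 ah with
  | nil => cases hR : pvResos 0 ah <;> simp
  | cons l0 lt =>
    cases hR : pvResos 0 ah with
    | nil => simp
    | cons r0 rt =>
      rw [hL] at hM; rw [hR] at hm
      rw [PySem.List.max?_id_cons, getLast?_cons] at hM
      rw [PySem.List.min?_id_cons] at hm
      simp only [Option.some.injEq] at hM
      simp only [List.head?_cons, Option.some.injEq] at hm
      simp [hM, hm, getLast?_cons]
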